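-- pv_equiv track=rewrite | github.com/ffnav26-crypto/newrare | main.py | is_rare_uid
-- ===== SOURCE A (Python) =====
-- def is_rare_uid(uid_str):
--     """Check if UID has rare patterns (repeating/sequential digits)"""
--     uid_str = str(uid_str)
--
--     # Check for repeating digits (at least 3 in a row)
--     for i in range(len(uid_str) - 2):
--         if uid_str[i] == uid_str[i+1] == uid_str[i+2]:
--             return True
--
--     # Check for sequential digits (at least 4 in a row)
--     for i in range(len(uid_str) - 3):
--         try:
--             digits = [int(uid_str[i+j]) for j in range(4)]
--             # Ascending sequence
--             if all(digits[j+1] - digits[j] == 1 for j in range(3)):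
--                 return True
--             # Descending sequence
--             if all(digits[j] - digits[j+1] == 1 for j in range(3)):
--                 return True
--         except:
--             continue
--
--     return False
-- ===== SOURCE B (Python) =====
-- def is_rare_uid(uid_str):
--     """Check if UID has rare patterns (repeating/sequential digits) -- single left-to-right scan."""
--     s = str(uid_str)
--     if not s:
--         return False
--     prev = s[0]
--     eq = asc = desc = 1
--     for ch in s[1:]:
--         eq = eq + 1 if ch == prev else 1
--         asc = asc + 1 if '0' <= prev <= '9' and '0' <= ch <= '9' and ord(ch) - ord(prev) == 1 else 1
--         desc = desc + 1 if '0' <= prev <= '9' and '0' <= ch <= '9' and ord(ch) - ord(prev) == -1 else 1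
--         if eq >= 3 or asc >= 4 or desc >= 4:
--             return True
--         prev = ch
--     return False
-- ===== Notes on version B (the rewrite author's own statement) =====
-- stated objective: alternative
-- what changed: Replaces A's two index-window passes (triples of equal chars, then 4-windows probed with int() under try/except) by a single left-to-right scan that keeps three run counters (equal run, ascending-digit run, descending-digit run) and returns True as soon as one reaches its threshold.
import Mathlib
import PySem

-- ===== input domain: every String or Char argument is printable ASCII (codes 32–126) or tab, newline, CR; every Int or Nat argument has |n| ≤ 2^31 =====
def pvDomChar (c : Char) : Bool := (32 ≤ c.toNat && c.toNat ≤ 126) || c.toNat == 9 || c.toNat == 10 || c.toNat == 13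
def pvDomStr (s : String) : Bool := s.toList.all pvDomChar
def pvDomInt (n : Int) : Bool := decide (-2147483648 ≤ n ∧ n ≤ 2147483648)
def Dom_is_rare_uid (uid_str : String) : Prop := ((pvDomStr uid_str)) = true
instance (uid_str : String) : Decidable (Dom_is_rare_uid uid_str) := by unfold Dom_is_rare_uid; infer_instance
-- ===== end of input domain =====

-- B replaces A's two index-window passes (with a try/except int() probe per window) by a single
-- left-to-right scan keeping three run counters with early exit (a different decomposition, same cost class).

-- ===== PORT A =====
-- Literal port of A: two `for i in range(...)` passes over windows; `int(uid_str[i+j])` is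
-- PySem.Int.ofChars? of the one-character string; `except: continue` is the `none => false` arm.
-- All indices produced by the ranges are in bounds, so the pyGetD defaults are never read.
def is_rare_uid (uid_str : String) : Bool :=
  let s := uid_str.toList
  (((PySem.List.pyRange 0 (PySem.List.len s - 2) 1).any (fun i =>
      (PySem.List.pyGetD s i ' ' == PySem.List.pyGetD s (i+1) ' ') &&
      (PySem.List.pyGetD s (i+1) ' ' == PySem.List.pyGetD s (i+2) ' '))))
  ||
  (((PySem.List.pyRange 0 (PySem.List.len s - 3) 1).any (fun i =>
      match (PySem.List.pyRange 0 4 1).mapM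
          (fun j => PySem.Int.ofChars? [PySem.List.pyGetD s (i+j) ' ']) with
      | none => false
      | some digits =>
        ((PySem.List.pyRange 0 3 1).all (fun j =>
            (PySem.List.pyGetD digits (j+1) 0 - PySem.List.pyGetD digits j 0 == 1)))
        ||
        ((PySem.List.pyRange 0 3 1).all (fun j =>
            (PySem.List.pyGetD digits j 0 - PySem.List.pyGetD digits (j+1) 0 == 1))))))

-- ===== PORT B =====
-- Helpers of B: `'0' <= c <= '9'` and `ord(ch) - ord(prev)`.
def isd (c : Char) : Bool := decide ('0' ≤ c) && decide (c ≤ '9')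
def stp (a b : Char) : Int := (b.toNat : Int) - (a.toNat : Int)

-- The single scan of Source B: three run counters, early `return True` on a threshold.
def altLoop : Char → Nat → Nat → Nat → List Char → Bool
  | _, _, _, _, [] => false
  | prev, eq, asc, desc, ch :: rest =>
    let eq' := if ch == prev then eq + 1 else 1
    let asc' := if isd prev && isd ch && (stp prev ch == 1) then asc + 1 else 1
    let desc' := if isd prev && isd ch && (stp prev ch == -1) then desc + 1 else 1
    if 3 ≤ eq' ∨ 4 ≤ asc' ∨ 4 ≤ desc' then true
    else altLoop ch eq' asc' desc' rest

def is_rare_uid_alt (uid_str : String) : Bool :=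
  match uid_str.toList with
  | [] => false
  | c :: rest => altLoop c 1 1 1 rest

-- ===== PRECONDITION & SPEC =====
def Spec_is_rare_uid (uid_str : String) (out : Bool) : Prop := out = is_rare_uid_alt uid_str
instance (uid_str : String) (out : Bool) : Decidable (Spec_is_rare_uid uid_str out) := by unfold Spec_is_rare_uid; infer_instance

-- ===== CLAIM (what is proved, stated in full; the proofs are below) =====
def Claim_equal_is_rare_uid : Prop := ∀ (uid_str : String), Dom_is_rare_uid uid_str → Spec_is_rare_uid uid_str (is_rare_uid uid_str)

-- ===== LEMMAS AND PROOFS =====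

-- Reference predicates: structural one-window-at-a-time forms of the three patterns.
def hw3 (x : Char) : List Char → Bool
  | b :: c :: _ => x == b && b == c
  | _ => false

def trip3 : List Char → Bool
  | [] => false
  | x :: l => hw3 x l || trip3 l

def hw4 (d : Int) (x : Char) : List Char → Bool
  | b :: c :: e :: _ =>
      isd x && isd b && isd c && isd e &&
      (stp x b == d) && (stp b c == d) && (stp c e == d)
  | _ => false

def seq4 (d : Int) : List Char → Bool
  | [] => false
  | x :: l => hw4 d x l || seq4 d l

-- The window body of A's second loop, character-level.
def wWin (d : Int) (s : List Char) (k : Nat) : Bool :=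
  isd (s.getD k ' ') && isd (s.getD (k+1) ' ') && isd (s.getD (k+2) ' ') && isd (s.getD (k+3) ' ') &&
  (stp (s.getD k ' ') (s.getD (k+1) ' ') == d) &&
  (stp (s.getD (k+1) ' ') (s.getD (k+2) ' ') == d) &&
  (stp (s.getD (k+2) ' ') (s.getD (k+3) ' ') == d)

-- B's counters, one at a time.
def tripC : Nat → Char → List Char → Bool
  | _, _, [] => false
  | eq, a, b :: t =>
    let e' := if b == a then eq + 1 else 1
    decide (3 ≤ e') || tripC e' b t

def seqC (d : Int) : Nat → Char → List Char → Bool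
  | _, _, [] => false
  | k, a, b :: t =>
    let k' := if isd a && isd b && (stp a b == d) then k + 1 else 1
    decide (4 ≤ k') || seqC d k' b t

def chainD (d : Int) : List Char → Bool
  | [] => true
  | [a] => isd a
  | a :: b :: t => isd a && (stp a b == d) && chainD d (b :: t)

-- int(c) on a single Dom character: its digit value, or ValueError.
lemma ofChars_single_aux : ∀ n : Fin 127, PySem.Int.ofChars? [Char.ofNat n.val] =
    (if isd (Char.ofNat n.val) then some (((Char.ofNat n.val).toNat : Int) - 48) else none) := by decide

lemma ofChars_single (c : Char) (h : pvDomChar c = true) :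
    PySem.Int.ofChars? [c] = if isd c then some ((c.toNat : Int) - 48) else none := by
  have h126 : c.toNat ≤ 126 := by
    simp only [pvDomChar, Bool.or_eq_true, Bool.and_eq_true, decide_eq_true_eq, beq_iff_eq] at h
    omega
  have := ofChars_single_aux ⟨c.toNat, by omega⟩
  simpa [Char.ofNat_toNat] using this

lemma dom_getD (s : List Char) (hdom : ∀ c ∈ s, pvDomChar c = true) (m : Nat) :
    pvDomChar (s.getD m ' ') = true := by
  rcases Nat.lt_or_ge m s.length with hm | hm
  · rw [List.getD_eq_getElem s ' ' hm]
    exact hdom _ (List.getElem_mem hm)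
  · rw [List.getD_eq_default s ' ' hm]
    decide

lemma pyRange_zero_nonpos (b : Int) (h : b ≤ 0) : PySem.List.pyRange 0 b 1 = [] := by
  simp [PySem.List.pyRange]; omega

lemma pyAny (n c : Nat) (b : Int) (hb : b = (n : Int) - (c : Int)) (f : Int → Bool) :
    (PySem.List.pyRange 0 b 1).any f = (List.range (n - c)).any (fun k => f (k : Int)) := by
  subst hb
  rcases Nat.lt_or_ge n c with h | h
  · have h0 : n - c = 0 := by omega
    rw [pyRange_zero_nonpos _ (by omega), h0]
    rfl
  · have hcast : ((n : Int) - (c : Int)) = ((n - c : Nat) : Int) := by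
      push_cast [h]; ring
    rw [hcast, PySem.List.pyRange_zero_natCast, List.any_map]
    rfl

-- A's first loop, character level.
lemma any3 (s : List Char) :
    (List.range (s.length - 2)).any (fun k =>
      (s.getD k ' ' == s.getD (k+1) ' ') && (s.getD (k+1) ' ' == s.getD (k+2) ' ')) = trip3 s := by
  induction s with
  | nil => rfl
  | cons a l ih =>
    cases l with
    | nil => rfl
    | cons b l2 =>
      cases l2 with
      | nil => rfl
      | cons c t =>
        have hlen : (a :: b :: c :: t).length - 2 = t.length + 1 := by simp
        have hlen2 : (b :: c :: t).length - 2 = t.length := by simp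
        rw [hlen2] at ih
        rw [hlen, List.range_succ_eq_map, List.any_cons, List.any_map]
        have hshift : (List.range t.length).any
            ((fun k => ((a::b::c::t).getD k ' ' == (a::b::c::t).getD (k+1) ' ') &&
              ((a::b::c::t).getD (k+1) ' ' == (a::b::c::t).getD (k+2) ' ')) ∘ Nat.succ)
            = (List.range t.length).any (fun k =>
              ((b::c::t).getD k ' ' == (b::c::t).getD (k+1) ' ') &&
              ((b::c::t).getD (k+1) ' ' == (b::c::t).getD (k+2) ' ')) := by
          apply List.any_congr rfl
          intro k
          simp only [Function.comp_apply, Nat.succ_eq_add_one, List.getD_cons_succ]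
        rw [hshift, ih]
        simp [trip3, hw3, List.getD]

-- A's second loop, character level.
lemma any4 (d : Int) (s : List Char) :
    (List.range (s.length - 3)).any (fun k => wWin d s k) = seq4 d s := by
  induction s with
  | nil => rfl
  | cons a l ih =>
    cases l with
    | nil => rfl
    | cons b l2 =>
      cases l2 with
      | nil => rfl
      | cons c l3 =>
        cases l3 with
        | nil => rfl
        | cons e t =>
          have hlen : (a :: b :: c :: e :: t).length - 3 = t.length + 1 := by simp
          have hlen2 : (b :: c :: e :: t).length - 3 = t.length := by simp
          rw [hlen2] at ih
          rw [hlen, List.range_succ_eq_map, List.any_cons, List.any_map]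
          have hshift : (List.range t.length).any ((fun k => wWin d (a::b::c::e::t) k) ∘ Nat.succ)
              = (List.range t.length).any (fun k => wWin d (b::c::e::t) k) := by
            apply List.any_congr rfl
            intro k
            simp only [Function.comp_apply, Nat.succ_eq_add_one, wWin, List.getD_cons_succ]
          rw [hshift, ih]
          simp [seq4, hw4, wWin, List.getD]

-- The body of A's second loop equals the two directed windows.
lemma bodyA_eq (s : List Char) (hdom : ∀ c ∈ s, pvDomChar c = true) (k : Nat) :
    (match (PySem.List.pyRange 0 4 1).mapM
        (fun j => PySem.Int.ofChars? [PySem.List.pyGetD s ((k : Int)+j) ' ']) with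
     | none => false
     | some digits =>
       ((PySem.List.pyRange 0 3 1).all (fun j =>
           (PySem.List.pyGetD digits (j+1) 0 - PySem.List.pyGetD digits j 0 == 1)))
       ||
       ((PySem.List.pyRange 0 3 1).all (fun j =>
           (PySem.List.pyGetD digits j 0 - PySem.List.pyGetD digits (j+1) 0 == 1))))
    = (wWin 1 s k || wWin (-1) s k) := by
  have hd0 := dom_getD s hdom k
  have hd1 := dom_getD s hdom (k+1)
  have hd2 := dom_getD s hdom (k+2)
  have hd3 := dom_getD s hdom (k+3)
  have h4 : PySem.List.pyRange 0 4 1 = [0,1,2,3] := by decide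
  have h3 : PySem.List.pyRange 0 3 1 = [0,1,2] := by decide
  have e1 : ((k:Int) + 1) = ((k+1 : Nat) : Int) := by push_cast; ring
  have e2 : ((k:Int) + 2) = ((k+2 : Nat) : Int) := by push_cast; ring
  have e3 : ((k:Int) + 3) = ((k+3 : Nat) : Int) := by push_cast; ring
  rw [h4]
  simp only [List.mapM_cons, List.mapM_nil, add_zero, e1, e2, e3, PySem.List.pyGetD_natCast,
    ofChars_single _ hd0, ofChars_single _ hd1, ofChars_single _ hd2, ofChars_single _ hd3]
  simp only [wWin]
  generalize hg0 : s.getD k ' ' = c0 at *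
  generalize hg1 : s.getD (k+1) ' ' = c1 at *
  generalize hg2 : s.getD (k+2) ' ' = c2 at *
  generalize hg3 : s.getD (k+3) ' ' = c3 at *
  by_cases h0 : isd c0 = true <;>
    by_cases h1 : isd c1 = true <;>
      by_cases h2 : isd c2 = true <;>
        by_cases h3' : isd c3 = true <;>
          simp [h0, h1, h2, h3', Option.bind]
  rw [h3]
  have harr : ∀ x y : Int, x - 48 - (y - 48) = x - y := by intro x y; ring
  have hflip : ∀ x y : Int, ((x - y == 1) : Bool) = ((y - x == -1) : Bool) := by
    intro x y
    by_cases h : x - y = 1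
    · simp [h, show y - x = -1 by omega]
    · simp [h, show ¬(y - x = -1) by omega]
  simp [PySem.List.pyGetD, stp, harr, hflip, Bool.and_assoc]

lemma any_or_split (l : List Nat) (f g : Nat → Bool) :
    (l.any fun k => f k || g k) = (l.any f || l.any g) := by
  induction l with
  | nil => rfl
  | cons a t ih => cases hf : f a <;> cases hg : g a <;> simp [List.any_cons, ih, hf, hg]

lemma seq4_short (d : Int) (l : List Char) (h : l.length ≤ 3) : seq4 d l = false := by
  match l, h with
  | [], _ => rfl
  | [a], _ => rfl
  | [a, b], _ => rfl
  | [a, b, c], _ => rfl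

-- B's eq counter: counter value eq stands for eq copies of the current character.
lemma tripC_eq (rest : List Char) : ∀ (a : Char) (eq : Nat), 1 ≤ eq → eq ≤ 2 →
    tripC eq a rest = trip3 (List.replicate eq a ++ rest) := by
  induction rest with
  | nil =>
    intro a eq h1 h2
    interval_cases eq <;> simp [tripC, trip3, hw3]
  | cons b t ih =>
    intro a eq h1 h2
    by_cases hb : b = a
    · subst hb
      interval_cases eq
      · rw [show tripC 1 b (b :: t) = (decide (3 ≤ 2) || tripC 2 b t) from by simp [tripC]]
        rw [ih b 2 (by omega) (by omega)]
        simp [trip3]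
      · rw [show tripC 2 b (b :: t) = (decide (3 ≤ 3) || tripC 3 b t) from by simp [tripC]]
        simp [trip3, hw3]
    · have hb' : ¬ a = b := fun h => hb h.symm
      have hbeq : (b == a) = false := by simp [hb]
      have haf : (a == b) = false := by simp [hb']
      have hbf : (b == a) = false := by simp [hb]
      interval_cases eq <;>
        · rw [show tripC _ a (b :: t) = (decide (3 ≤ 1) || tripC 1 b t) from by simp [tripC, hbeq]]
          rw [ih b 1 (by omega) (by omega)]
          cases t <;> simp [trip3, hw3, haf]

-- B's directed counters: counter value k stands for a chain pre ++ [a] of k digits stepping by d.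
lemma seqC_eq (d : Int) (rest : List Char) : ∀ (pre : List Char) (a : Char),
    pre.length ≤ 2 → (pre = [] ∨ chainD d (pre ++ [a]) = true) →
    seqC d (pre.length + 1) a rest = seq4 d (pre ++ a :: rest) := by
  induction rest with
  | nil =>
    intro pre a hlen _
    rw [show seqC d (pre.length + 1) a [] = false from rfl]
    rw [seq4_short d _ (by simp; omega)]
  | cons b t ih =>
    intro pre a hlen hch
    by_cases hc : (isd a && isd b && (stp a b == d)) = true
    · match pre, hlen with
      | [], _ =>
        show seqC d 1 a (b :: t) = seq4 d (a :: b :: t)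
        rw [show seqC d 1 a (b :: t) = (decide (4 ≤ 2) || seqC d 2 b t) from by simp [seqC, hc]]
        rw [show (2 : Nat) = [a].length + 1 from rfl, ih [a] b (by simp) (by
          right
          simp only [chainD, List.cons_append, List.nil_append]
          simp only [Bool.and_eq_true] at hc ⊢
          exact ⟨⟨hc.1.1, hc.2⟩, hc.1.2⟩)]
        simp
      | [p], hch2 =>
        rcases hch with h | hch
        · exact absurd h (by simp)
        show seqC d 2 a (b :: t) = seq4 d (p :: a :: b :: t)
        rw [show seqC d 2 a (b :: t) = (decide (4 ≤ 3) || seqC d 3 b t) from by simp [seqC, hc]]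
        rw [show (3 : Nat) = [p, a].length + 1 from rfl, ih [p, a] b (by simp) (by
          right
          simp only [chainD, List.cons_append, List.nil_append] at hch ⊢
          simp only [Bool.and_eq_true] at hc hch ⊢
          exact ⟨hch.1, ⟨hch.2, hc.2⟩, hc.1.2⟩)]
        simp
      | [p, q], _ =>
        rcases hch with h | hch
        · exact absurd h (by simp)
        show seqC d 3 a (b :: t) = seq4 d (p :: q :: a :: b :: t)
        rw [show seqC d 3 a (b :: t) = (decide (4 ≤ 4) || seqC d 4 b t) from by simp [seqC, hc]]
        have hwin : hw4 d p (q :: a :: b :: t) = true := by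
          simp only [chainD, List.cons_append, List.nil_append] at hch
          simp only [Bool.and_eq_true] at hc hch
          simp [hw4, hch.1.1, hch.1.2, hch.2.1.1, hch.2.1.2, hch.2.2, hc.1.2, hc.2]
        simp [seq4, hwin]
    · have h1 : seqC d (pre.length + 1) a (b :: t) = seqC d 1 b t := by
        simp [seqC, hc]
      rw [h1, show (1 : Nat) = List.length ([] : List Char) + 1 from rfl,
        ih [] b (by simp) (Or.inl rfl)]
      simp only [List.nil_append]
      -- peel the windows that straddle the failed pair (a, b)
      have hpeel : ∀ x l, hw4 d x l = false → seq4 d (x :: l) = seq4 d l := by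
        intro x l hf
        simp [seq4, hf]
      simp at hc
      have ha1 : ∀ t', hw4 d a (b :: t') = false := by
        intro t'
        rcases t' with _ | ⟨u, _ | ⟨v, t2⟩⟩ <;> (simp [hw4]; try tauto)
      have ha2 : ∀ x t', hw4 d x (a :: b :: t') = false := by
        intro x t'
        rcases t' with _ | ⟨u, t2⟩ <;> (simp [hw4]; try tauto)
      have ha3 : ∀ x y t', hw4 d x (y :: a :: b :: t') = false := by
        intro x y t'
        simp [hw4]; tauto
      match pre, hlen with
      | [], _ =>
        rw [show ([] : List Char) ++ a :: b :: t = a :: b :: t from rfl, hpeel a _ (ha1 t)]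
      | [p], _ =>
        rw [show [p] ++ a :: b :: t = p :: a :: b :: t from rfl, hpeel p _ (ha2 p t),
          hpeel a _ (ha1 t)]
      | [p, q], _ =>
        rw [show [p, q] ++ a :: b :: t = p :: q :: a :: b :: t from rfl,
          hpeel p _ (ha3 p q t), hpeel q _ (ha2 q t), hpeel a _ (ha1 t)]

-- The scan is the disjunction of its three counters.
lemma altLoop_split (rest : List Char) : ∀ (prev : Char) (eq asc desc : Nat),
    altLoop prev eq asc desc rest =
      (tripC eq prev rest || (seqC 1 asc prev rest || seqC (-1) desc prev rest)) := by
  induction rest with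
  | nil => intro prev eq asc desc; rfl
  | cons ch t ih =>
    intro prev eq asc desc
    simp only [altLoop, tripC, seqC]
    generalize (if (ch == prev) = true then eq + 1 else 1) = E
    generalize (if (isd prev && isd ch && (stp prev ch == 1)) = true then asc + 1 else 1) = A
    generalize (if (isd prev && isd ch && (stp prev ch == -1)) = true then desc + 1 else 1) = D
    split_ifs with h
    · rcases h with h | h | h <;> simp [h]
    · have h1 : ¬ 3 ≤ E := fun hh => h (Or.inl hh)
      have h2 : ¬ 4 ≤ A := fun hh => h (Or.inr (Or.inl hh))
      have h3 : ¬ 4 ≤ D := fun hh => h (Or.inr (Or.inr hh))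
      simp [h1, h2, h3, ih]

lemma alt_char (l : List Char) :
    (match l with | [] => false | c :: rest => altLoop c 1 1 1 rest)
      = (trip3 l || (seq4 1 l || seq4 (-1) l)) := by
  cases l with
  | nil => rfl
  | cons c rest =>
    show altLoop c 1 1 1 rest = _
    rw [altLoop_split rest c 1 1 1, tripC_eq rest c 1 (by omega) (by omega),
      show (1 : Nat) = List.length ([] : List Char) + 1 from rfl,
      seqC_eq 1 rest [] c (by simp) (Or.inl rfl),
      seqC_eq (-1) rest [] c (by simp) (Or.inl rfl)]
    simp

-- ===== VERDICT (by name: the statement is the Claim_ definition above) =====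
theorem is_rare_uid_spec : Claim_equal_is_rare_uid := by
  intro uid_str hdom
  unfold Spec_is_rare_uid is_rare_uid is_rare_uid_alt
  have hdom' : ∀ c ∈ uid_str.toList, pvDomChar c = true := by
    simpa [Dom_is_rare_uid, pvDomStr, List.all_eq_true] using hdom
  generalize hL : uid_str.toList = L at hdom' ⊢
  rw [alt_char L]
  simp only [PySem.List.len_eq]
  rw [pyAny L.length 2 _ (by push_cast; ring), pyAny L.length 3 _ (by push_cast; ring)]
  have hbody2 : (List.range (L.length - 3)).any (fun k =>
      (fun i => match (PySem.List.pyRange 0 4 1).mapM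
          (fun j => PySem.Int.ofChars? [PySem.List.pyGetD L (i+j) ' ']) with
        | none => false
        | some digits =>
          ((PySem.List.pyRange 0 3 1).all (fun j =>
              (PySem.List.pyGetD digits (j+1) 0 - PySem.List.pyGetD digits j 0 == 1)))
          ||
          ((PySem.List.pyRange 0 3 1).all (fun j =>
              (PySem.List.pyGetD digits j 0 - PySem.List.pyGetD digits (j+1) 0 == 1)))) (k : Int))
      = (seq4 1 L || seq4 (-1) L) := by
    rw [List.any_congr rfl (fun k => bodyA_eq L hdom' k), any_or_split, any4 1 L, any4 (-1) L]
  have hbody1 : (List.range (L.length - 2)).any (fun k =>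
      (fun i => (PySem.List.pyGetD L i ' ' == PySem.List.pyGetD L (i+1) ' ') &&
        (PySem.List.pyGetD L (i+1) ' ' == PySem.List.pyGetD L (i+2) ' ')) (k : Int))
      = trip3 L := by
    rw [← any3 L]
    apply List.any_congr rfl
    intro k
    have e1 : ((k:Int) + 1) = ((k+1 : Nat) : Int) := by push_cast; ring
    have e2 : ((k:Int) + 2) = ((k+2 : Nat) : Int) := by push_cast; ring
    simp only [e1, e2, PySem.List.pyGetD_natCast]
  rw [hbody1, hbody2]
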